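-- pv_equiv track=rewrite | github.com/ryongseong/programmers | 무지의 먹방 라이브/무지의먹방라이브3.py | solution
-- ===== SOURCE A (Python) =====
-- from collections import deque
--
-- def solution(food_times, k):
--
--     food_list = deque()
--     for idx, food in enumerate(food_times):
--         food_list.append([idx, food])
--
--     if sum(food_times) <= k:
--         return -1
--     else:
--         sol(food_list, k)
--     answer = food_list[0][0] + 1
--     return answer
--
-- def sol(food_list, k):
--     food = food_list.popleft()
--
--     k -= 1
--     food[1] -= 1
--
--     if food[1] != 0:
--         food_list.append(food)
--
--     if k != 0:
--         sol(food_list, k)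
-- ===== SOURCE B (Python) =====
-- def solution(food_times, k):
--     total = sum(food_times)
--     if total <= k:
--         return -1
--     prev = 0
--     rem = len(food_times)
--     for t in sorted(food_times):
--         need = (t - prev) * rem
--         if k < need:
--             break
--         k -= need
--         prev = t
--         rem -= 1
--     survivors = [i + 1 for i in range(len(food_times)) if food_times[i] > prev]
--     return survivors[k % rem]
-- ===== Notes on version B (the rewrite author's own statement) =====
-- stated objective: alternative
-- what changed: A simulates the round-robin one second at a time with k recursive deque steps; B sorts the times once and skips whole rounds arithmetically, finding the surviving food by a single modulus, so its cost depends on n only, not on k.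
-- outside the precondition, e.g. on solution([5, -1], 3): A returns 2, B returns 1; on solution([2, 0, 2], 2): A returns 3, B returns 1
import Mathlib
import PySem

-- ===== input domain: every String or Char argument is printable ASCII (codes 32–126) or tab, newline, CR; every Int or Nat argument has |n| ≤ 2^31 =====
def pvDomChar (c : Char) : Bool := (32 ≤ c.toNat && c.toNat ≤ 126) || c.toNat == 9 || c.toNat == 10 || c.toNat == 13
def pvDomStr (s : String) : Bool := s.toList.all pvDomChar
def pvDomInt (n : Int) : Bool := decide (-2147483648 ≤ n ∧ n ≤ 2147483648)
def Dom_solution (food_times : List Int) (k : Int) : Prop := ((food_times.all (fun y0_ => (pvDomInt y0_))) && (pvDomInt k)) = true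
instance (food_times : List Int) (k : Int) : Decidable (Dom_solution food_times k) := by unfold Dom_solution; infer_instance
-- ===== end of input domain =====

-- B replaces A's second-by-second recursive deque simulation by sort + round-skipping
-- arithmetic whose cost depends only on the list length, not on k.

-- ===== PORT A =====
-- A's `sol` pops the front food, eats one second, re-appends it unless finished, and recurses
-- while k ≠ 0.  Ported with fuel k.toNat (Python diverges for k ≤ 0 with sum > k: outside Pre_);
-- popping an empty deque (IndexError in Python) cannot happen under Pre_ and returns [].
def solSteps : List (Int × Int) → Nat → List (Int × Int)
  | fl, 0 => fl
  | [], _ + 1 => []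
  | (idx, t) :: rest, n + 1 =>
      solSteps (if t - 1 ≠ 0 then rest ++ [(idx, t - 1)] else rest) n

-- food_list[0][0] + 1 (the [] case is Python's IndexError, unreachable under Pre_)
def pvAnswer : List (Int × Int) → Int
  | [] => 0
  | (i, _) :: _ => i + 1

def solution (food_times : List Int) (k : Int) : Int :=
  let food_list := PySem.List.enumerate food_times
  if food_times.sum ≤ k then -1
  else pvAnswer (solSteps food_list k.toNat)

-- ===== PORT B =====
-- the `for t in sorted(food_times)` loop: returns the final (prev, k, rem)
def loopB : List Int → Int → Int → Int → Int × Int × Int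
  | [], prev, k, rem => (prev, k, rem)
  | t :: rest, prev, k, rem =>
      if k < (t - prev) * rem then (prev, k, rem)
      else loopB rest t (k - (t - prev) * rem) (rem - 1)

def solution_alt (food_times : List Int) (k : Int) : Int :=
  if food_times.sum ≤ k then -1
  else
    let r := loopB (PySem.List.sorted food_times (fun t => t) false) 0 k
               (PySem.List.len food_times)
    let survivors := ((PySem.List.pyRange 0 (PySem.List.len food_times) 1).filter
        (fun i => r.1 < PySem.List.pyGetD food_times i 0)).map (fun i => i + 1)
    PySem.List.pyGetD survivors (PySem.Int.mod r.2.1 r.2.2) 0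

-- ===== PRECONDITION & SPEC =====
-- Pre_ excludes (a) lists with a non-positive entry unless A answers -1 outright: negative or
-- zero eating times are outside the problem's domain and A's round-robin then returns values
-- that are artefacts of its simulation, and (b) k ≤ 0 with sum > k, where A recurses forever.
def Pre_solution (food_times : List Int) (k : Int) : Prop :=
  food_times.sum ≤ k ∨ ((∀ t ∈ food_times, 1 ≤ t) ∧ 1 ≤ k)
instance (food_times : List Int) (k : Int) : Decidable (Pre_solution food_times k) := by
  unfold Pre_solution; infer_instance

def pvWitness_solution : List Int × Int := ([3, 1, 2], 5)

def Spec_solution (food_times : List Int) (k : Int) (out : Int) : Prop :=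
  out = solution_alt food_times k
instance (food_times : List Int) (k : Int) (out : Int) : Decidable (Spec_solution food_times k out) := by
  unfold Spec_solution; infer_instance

-- ===== CLAIM (what is proved, stated in full; the proofs are below) =====
def Claim_equal_solution : Prop := ∀ (food_times : List Int) (k : Int),
  Dom_solution food_times k → Pre_solution food_times k →
  Spec_solution food_times k (solution food_times k)

-- ===== LEMMAS AND PROOFS =====

-- the deque after one second of eating (A's pop/decrement/conditional re-append)
def stepA (fl : List (Int × Int)) : List (Int × Int) :=
  match fl with
  | [] => []
  | (idx, t) :: rest => if t - 1 ≠ 0 then rest ++ [(idx, t - 1)] else rest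

-- one full round over L (each food eaten once, the finished ones dropped)
def eatRound (L : List (Int × Int)) : List (Int × Int) :=
  (L.map (fun q => (q.1, q.2 - 1))).filter (fun q => q.2 ≠ 0)

-- the deque after everything has been eaten down to level p: survivors keep their order
def levelState (p : Nat) (L : List (Int × Int)) : List (Int × Int) :=
  (L.filter (fun q => (p : Int) < q.2)).map (fun q => (q.1, q.2 - p))

-- seconds consumed to reach level p
def eatenN : Nat → List (Int × Int) → Nat
  | 0, _ => 0
  | p + 1, L => eatenN p L + (levelState p L).length

theorem solSteps_nil (n : Nat) : solSteps [] n = [] := by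
  cases n <;> rfl

theorem solSteps_succ (fl : List (Int × Int)) (n : Nat) :
    solSteps fl (n + 1) = solSteps (stepA fl) n := by
  match fl with
  | [] => simp [stepA, solSteps, solSteps_nil]
  | (i, t) :: rest => rfl

theorem solSteps_add (L : List (Int × Int)) (a b : Nat) :
    solSteps L (a + b) = solSteps (solSteps L a) b := by
  induction a generalizing L with
  | zero => rw [Nat.zero_add]; rfl
  | succ a ih =>
      have : a + 1 + b = (a + b) + 1 := by omega
      rw [this, solSteps_succ, solSteps_succ, ih]

theorem eatRound_cons (i t : Int) (L : List (Int × Int)) :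
    eatRound ((i, t) :: L) =
      (if t - 1 ≠ 0 then [(i, t - 1)] else []) ++ eatRound L := by
  by_cases h : t - 1 = 0 <;> simp [eatRound, h]

theorem roundLemma (L R : List (Int × Int)) :
    solSteps (L ++ R) L.length = R ++ eatRound L := by
  induction L generalizing R with
  | nil => simp [solSteps, eatRound]
  | cons q L' ih =>
      obtain ⟨i, t⟩ := q
      rw [List.cons_append, List.length_cons, solSteps_succ, eatRound_cons]
      by_cases h : t - 1 = 0
      · rw [show stepA ((i, t) :: (L' ++ R)) = L' ++ R by simp [stepA, h]]
        rw [show (if t - 1 ≠ 0 then [(i, t - 1)] else []) = [] by simp [h]]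
        simp [ih]
      · rw [show stepA ((i, t) :: (L' ++ R)) = L' ++ (R ++ [(i, t - 1)]) by
          simp [stepA, h]]
        rw [show (if t - 1 ≠ 0 then [(i, t - 1)] else []) = [(i, t - 1)] by simp [h]]
        rw [ih]
        simp

theorem levelState_cons (p : Nat) (i t : Int) (L : List (Int × Int)) :
    levelState p ((i, t) :: L) =
      (if (p : Int) < t then [(i, t - p)] else []) ++ levelState p L := by
  by_cases h : (p : Int) < t <;> simp [levelState, h]

theorem eatRound_levelState (p : Nat) (L : List (Int × Int)) :
    eatRound (levelState p L) = levelState (p + 1) L := by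
  induction L with
  | nil => rfl
  | cons q L' ih =>
      obtain ⟨i, t⟩ := q
      rw [levelState_cons, levelState_cons]
      have hcast : ((p + 1 : Nat) : Int) = (p : Int) + 1 := by push_cast; ring
      by_cases h1 : (p : Int) < t
      · rw [if_pos h1, List.singleton_append, eatRound_cons, ih]
        by_cases h2 : (p : Int) + 1 < t
        · rw [if_pos (show t - (p : Int) - 1 ≠ 0 by omega), hcast, if_pos h2]
          rw [show t - ((p : Int) + 1) = t - (p : Int) - 1 by ring]
        · rw [if_neg (show ¬ t - (p : Int) - 1 ≠ 0 by omega), hcast, if_neg h2]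
      · rw [if_neg h1, if_neg (by rw [hcast]; omega), List.nil_append, List.nil_append,
          ih]

theorem level (L : List (Int × Int)) (hpos : ∀ q ∈ L, 1 ≤ q.2) (p : Nat) :
    solSteps L (eatenN p L) = levelState p L := by
  induction p with
  | zero =>
      show solSteps L 0 = levelState 0 L
      have hf : L.filter (fun q => (0 : Int) < q.2) = L :=
        List.filter_eq_self.mpr (fun q hq => by
          have := hpos q hq; simp; omega)
      simp [solSteps, levelState, hf]
  | succ p ih =>
      show solSteps L (eatenN p L + (levelState p L).length) = _
      rw [solSteps_add, ih]
      have h := roundLemma (levelState p L) []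
      rw [List.append_nil] at h
      rw [h, eatRound_levelState, List.nil_append]

theorem length_levelState (p : Nat) (L : List (Int × Int)) :
    (levelState p L).length = L.countP (fun q => decide ((p : Int) < q.2)) := by
  simp [levelState, List.countP_eq_length_filter]

theorem eatenN_jump (L : List (Int × Int)) (a d : Nat)
    (h : ∀ q ∈ L, q.2 ≤ (a : Int) ∨ ((a : Int) + d) ≤ q.2) :
    eatenN (a + d) L = eatenN a L + d * L.countP (fun q => decide ((a : Int) < q.2)) := by
  induction d with
  | zero => simp
  | succ d ih =>
      have h' : ∀ q ∈ L, q.2 ≤ (a : Int) ∨ ((a : Int) + d) ≤ q.2 := by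
        intro q hq
        rcases h q hq with h1 | h1
        · exact Or.inl h1
        · right; push_cast at h1 ⊢; omega
      have hstep : a + (d + 1) = (a + d) + 1 := by omega
      rw [hstep]
      show eatenN (a + d) L + (levelState (a + d) L).length = _
      rw [ih h', length_levelState]
      have hc : L.countP (fun q => decide (((a + d : Nat) : Int) < q.2)) =
          L.countP (fun q => decide ((a : Int) < q.2)) := by
        apply List.countP_congr
        intro q hq
        rcases h q hq with h1 | h1 <;> · push_cast at h1 ⊢; simp; omega
      rw [hc]; ring

theorem solSteps_drop (j : Nat) (M : List (Int × Int)) (hj : j ≤ M.length) :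
    ∃ tail, solSteps M j = M.drop j ++ tail := by
  induction j generalizing M with
  | zero => exact ⟨[], by simp [solSteps]⟩
  | succ j ih =>
      match M with
      | [] => simp at hj
      | (i, t) :: M' =>
          rw [solSteps_succ]
          have hδ : ∃ δ, stepA ((i, t) :: M') = M' ++ δ := by
            by_cases h : t - 1 = 0
            · exact ⟨[], by simp [stepA, h]⟩
            · exact ⟨[(i, t - 1)], by simp [stepA, h]⟩
          obtain ⟨δ, hδ⟩ := hδ
          have hj' : j ≤ M'.length := by simpa using hj
          obtain ⟨tail', ht⟩ := ih (M' ++ δ) (by simp; omega)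
          refine ⟨δ ++ tail'.drop (δ.length - (δ.length)), ?_⟩
          rw [hδ, ht, List.drop_append_of_le_length hj', List.drop_succ_cons]
          simp


theorem pvAnswer_cons (x : Int × Int) (l : List (Int × Int)) :
    pvAnswer (x :: l) = x.1 + 1 := by
  obtain ⟨i, t⟩ := x; rfl

-- B's epilogue: survivors list and the modulus index, applied to the loop's result
def pvFinish (ft : List Int) (r : Int × Int × Int) : Int :=
  PySem.List.pyGetD (((PySem.List.pyRange 0 (PySem.List.len ft) 1).filter
      (fun i => r.1 < PySem.List.pyGetD ft i 0)).map (fun i => i + 1))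
    (PySem.Int.mod r.2.1 r.2.2) 0

-- count of foods still alive above level p, read off done/s
theorem countE (ft done s : List Int) (hperm : ft.Perm (done ++ s)) (p : Int)
    (hd : ∀ u ∈ done, u ≤ p) (hs : ∀ u ∈ s, p < u) :
    (PySem.List.enumerate ft).countP (fun q => decide (p < q.2)) = s.length := by
  have h1 : (PySem.List.enumerate ft).countP (fun q => decide (p < q.2)) =
      ft.countP (fun u => decide (p < u)) := by
    conv_rhs => rw [← PySem.List.map_snd_enumerate ft (s := 0)]
    rw [List.countP_map]
    rfl
  rw [h1, hperm.countP_eq, List.countP_append,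
    List.countP_eq_zero.mpr (by intro u hu; simpa using not_lt.mpr (hd u hu)),
    List.countP_eq_length.mpr (by intro u hu; simpa using hs u hu)]
  simp

-- the alive entries of the deque are exactly B's filtered index range, paired with their times
theorem filterE (ft : List Int) (p : Int) :
    (PySem.List.enumerate ft).filter (fun q => decide (p < q.2)) =
      ((PySem.List.pyRange 0 (PySem.List.len ft) 1).filter
        (fun i => decide (p < PySem.List.pyGetD ft i 0))).map
        (fun i => (i, PySem.List.pyGetD ft i 0)) := by
  rw [PySem.List.enumerate_eq_map_pyRange ft 0, List.filter_map]
  rfl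

theorem mem_snd_enumerate (ft : List Int) (q : Int × Int)
    (hq : q ∈ PySem.List.enumerate ft) : q.2 ∈ ft := by
  rw [PySem.List.mem_enumerate_iff] at hq
  obtain ⟨k, hk, rfl⟩ := hq
  simp

-- the main loop invariant: A's simulation, fast-forwarded to level prev with k seconds left,
-- answers exactly what B's loop followed by B's epilogue answers
theorem loop_main (ft : List Int) (hpos : ∀ t ∈ ft, 1 ≤ t) :
    ∀ (s done : List Int) (prev k : Int),
    ft.Perm (done ++ s) →
    (∀ t ∈ done, t ≤ prev) →
    (∀ t ∈ s, prev ≤ t) →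
    s.Pairwise (· ≤ ·) →
    0 ≤ prev →
    0 ≤ k →
    k < (s.map (fun t => t - prev)).sum →
    pvAnswer (solSteps (PySem.List.enumerate ft)
        (eatenN prev.toNat (PySem.List.enumerate ft) + k.toNat)) =
      pvFinish ft (loopB s prev k s.length) := by
  intro s
  induction s with
  | nil =>
      intro done prev k _ _ _ _ _ hk hlt
      simp at hlt
      omega
  | cons t rest ih =>
      intro done prev k hperm hdone hslb hpair hprev hk hlt
      have hts : prev ≤ t := hslb t (by simp)
      have hrest_ge_t : ∀ u ∈ rest, t ≤ u := (List.pairwise_cons.mp hpair).1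
      have hpair' := (List.pairwise_cons.mp hpair).2
      have hEpos : ∀ x ∈ PySem.List.enumerate ft, 1 ≤ x.2 :=
        fun x hx => hpos x.2 (mem_snd_enumerate ft x hx)
      set E := PySem.List.enumerate ft with hE
      set rem : Int := (((t :: rest).length : Nat) : Int) with hrem
      have hrem_eq : rem = (rest.length : Int) + 1 := by simp [hrem]
      have hrem_pos : 0 < rem := by omega
      have hprevn : ((prev.toNat : Int)) = prev := Int.toNat_of_nonneg hprev
      have hcntP : (fun x : Int × Int => decide ((prev.toNat : Int) < x.2)) =
          (fun x : Int × Int => decide (prev < x.2)) := by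
        funext x; rw [hprevn]
      have hcount : ∀ p : Int, prev ≤ p → p < t →
          E.countP (fun q => decide (p < q.2)) = (t :: rest).length := by
        intro p h1 h2
        refine countE ft done (t :: rest) hperm p
          (fun u hu => le_trans (hdone u hu) h1) ?_
        intro u hu
        rcases List.mem_cons.mp hu with rfl | hu
        · exact h2
        · exact lt_of_lt_of_le h2 (hrest_ge_t u hu)
      by_cases hk_br : k < (t - prev) * rem
      · -- the loop breaks here: B answers via the modulus, A via q full rounds + j steps
        have hloop : loopB (t :: rest) prev k rem = (prev, k, rem) := by
          simp [loopB, hk_br]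
        rw [hloop]
        have ht_gt : prev < t := by
          rcases eq_or_lt_of_le hts with heq | h
          · exfalso; rw [← heq] at hk_br; simp at hk_br; omega
          · exact h
        set q := PySem.Int.floordiv k rem with hq
        set j := PySem.Int.mod k rem with hjj
        have hj0 : 0 ≤ j := PySem.Int.mod_nonneg k hrem_pos
        have hjlt : j < rem := PySem.Int.mod_lt k hrem_pos
        have hqk : q * rem + j = k := PySem.Int.floordiv_mul_add_mod k rem
        have hq0 : 0 ≤ q := by
          rw [hq, PySem.Int.floordiv_eq_ediv_of_pos hrem_pos]
          exact Int.ediv_nonneg hk (le_of_lt hrem_pos)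
        have hq_lt : q < t - prev := by
          have h1 : q * rem < (t - prev) * rem := by omega
          exact lt_of_mul_lt_mul_right h1 (le_of_lt hrem_pos)
        have hqn : ((q.toNat : Int)) = q := Int.toNat_of_nonneg hq0
        have hjump : eatenN (prev.toNat + q.toNat) E =
            eatenN prev.toNat E +
              q.toNat * E.countP (fun x => decide ((prev.toNat : Int) < x.2)) := by
          apply eatenN_jump
          intro x hx
          have hx2 : x.2 ∈ ft := mem_snd_enumerate ft x hx
          rcases List.mem_append.mp (hperm.mem_iff.mp hx2) with hL | hR
          · left; rw [hprevn]; exact hdone _ hL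
          · right
            have htle : t ≤ x.2 := by
              rcases List.mem_cons.mp hR with rfl | hu
              · exact le_refl _
              · exact hrest_ge_t _ hu
            rw [hprevn, hqn]; omega
        have hcnt : E.countP (fun x => decide ((prev.toNat : Int) < x.2)) =
            (t :: rest).length := by
          rw [hcntP]; exact hcount prev (le_refl _) ht_gt
        set cntN := (t :: rest).length with hcntN
        have hremc : ((cntN : Nat) : Int) = rem := by rw [hrem]
        have h_toNat : k.toNat = q.toNat * cntN + j.toNat := by
          have h1 : ((q.toNat * cntN : Nat) : Int) = q * rem := by
            push_cast
            rw [hqn, hremc]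
          omega
        -- fast-forward A by q full rounds, then j single steps
        set pn := prev.toNat + q.toNat with hpn
        have hpnc : ((pn : Int)) = prev + q := by rw [hpn]; push_cast; rw [hprevn, hqn]
        have hlevel : solSteps E (eatenN pn E) = levelState pn E := level E hEpos pn
        have hMP : (fun x : Int × Int => decide ((pn : Int) < x.2)) =
            (fun x : Int × Int => decide ((prev + q) < x.2)) := by
          funext x; rw [hpnc]
        have hMlen : (levelState pn E).length = cntN := by
          rw [length_levelState, hMP]
          exact hcount (prev + q) (by omega) (by omega)
        have hsplit : eatenN prev.toNat E + k.toNat = eatenN pn E + j.toNat := by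
          rw [hpn, hjump, hcnt]; omega
        rw [hsplit, solSteps_add, hlevel]
        have hjn_lt : j.toNat < (levelState pn E).length := by
          rw [hMlen]; omega
        obtain ⟨tail, htail⟩ := solSteps_drop j.toNat (levelState pn E) (le_of_lt hjn_lt)
        rw [htail, List.drop_eq_getElem_cons hjn_lt, List.cons_append, pvAnswer_cons]
        -- identify the surviving deque with B's filtered index list
        have hfilter_eq : E.filter (fun x => decide ((pn : Int) < x.2)) =
            E.filter (fun x => decide (prev < x.2)) := by
          apply List.filter_congr
          intro x hx
          have hx2 : x.2 ∈ ft := mem_snd_enumerate ft x hx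
          have : x.2 ≤ prev ∨ t ≤ x.2 := by
            rcases List.mem_append.mp (hperm.mem_iff.mp hx2) with hL | hR
            · exact Or.inl (hdone _ hL)
            · right
              rcases List.mem_cons.mp hR with rfl | hu
              · exact le_refl _
              · exact hrest_ge_t _ hu
          rw [hpnc]
          rcases this with h1 | h1 <;> simp <;> omega
        set I := (PySem.List.pyRange 0 (PySem.List.len ft) 1).filter
            (fun i => decide (prev < PySem.List.pyGetD ft i 0)) with hI
        have hEI : E.filter (fun x => decide (prev < x.2)) =
            I.map (fun i => (i, PySem.List.pyGetD ft i 0)) := filterE ft prev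
        have hIlen : I.length = cntN := by
          have := congrArg List.length hEI
          rw [List.length_map] at this
          rw [← this, ← List.countP_eq_length_filter]
          exact hcount prev (le_refl _) ht_gt
        -- left side: the j-th survivor's index
        have hLHS : ((levelState pn E)[j.toNat]'hjn_lt).1 =
            I[j.toNat]'(by rw [hIlen]; rw [hMlen] at hjn_lt; exact hjn_lt) := by
          have hjn_lt2 : j.toNat < (E.filter (fun x => decide ((pn : Int) < x.2))).length := by
            have := hjn_lt
            simpa [levelState] using this
          simp only [levelState, List.getElem_map]
          have : (E.filter (fun x => decide ((pn : Int) < x.2)))[j.toNat]'hjn_lt2 =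
              (I.map (fun i => (i, PySem.List.pyGetD ft i 0)))[j.toNat]'(by
                rw [← hEI, ← hfilter_eq]; exact hjn_lt2) := by
            congr 1
            rw [hfilter_eq, hEI]
          rw [this, List.getElem_map]
        -- right side: B's epilogue
        have hRHS : pvFinish ft (prev, k, rem) =
            I[j.toNat]'(by rw [hIlen]; rw [hMlen] at hjn_lt; exact hjn_lt) + 1 := by
          unfold pvFinish
          simp only [← hI, ← hjj]
          have hslen : ((I.map (fun i => i + 1)).length : Int) = rem := by
            rw [List.length_map, hIlen]
          have hlen2 : j < (((I.map (fun i => i + 1)).length : Nat) : Int) := by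
            rw [hslen]; exact hjlt
          rw [PySem.List.pyGetD_eq_getElem _ 0 hj0 hlen2, List.getElem_map]
        rw [hLHS, hRHS]
      · -- the loop continues: A fast-forwards to level t, B recurses on the tail
        have hk_ge : (t - prev) * rem ≤ k := not_lt.mp hk_br
        set k' := k - (t - prev) * rem with hk'def
        have hk'0 : 0 ≤ k' := by omega
        have hloop : loopB (t :: rest) prev k rem = loopB rest t k' ((rest.length : Nat) : Int) := by
          show loopB (t :: rest) prev k rem = _
          simp only [loopB]
          rw [if_neg hk_br]
          rw [show rem - 1 = ((rest.length : Nat) : Int) by omega]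
        rw [hloop]
        have hsum : ((t :: rest).map (fun u => u - prev)).sum =
            (t - prev) + ((rest.map (fun u => u - t)).sum + (rest.length : Int) * (t - prev)) := by
          rw [List.map_cons, List.sum_cons]
          congr 1
          have hfun : (fun u : Int => u - prev) = (fun u : Int => (u - t) + (t - prev)) := by
            funext u; ring
          rw [hfun, PySem.List.sum_map_add_int, PySem.List.sum_map_const_int]
        have hlt' : k' < (rest.map (fun u => u - t)).sum := by
          rw [hsum] at hlt
          have hexp : (t - prev) * rem = (rest.length : Int) * (t - prev) + (t - prev) := by
            rw [hrem_eq]; ring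
          omega
        have ht0 : 0 ≤ t := le_trans hprev hts
        have hstep : eatenN prev.toNat E + k.toNat = eatenN t.toNat E + k'.toNat := by
          rcases eq_or_lt_of_le hts with heq | hlt_t
          · have h1 : prev.toNat = t.toNat := by omega
            have h2 : (t - prev) * rem = 0 := by rw [← heq]; ring
            rw [h1]
            omega
          · have hjump2 : eatenN (prev.toNat + (t - prev).toNat) E =
                eatenN prev.toNat E +
                  (t - prev).toNat * E.countP (fun x => decide ((prev.toNat : Int) < x.2)) := by
              apply eatenN_jump
              intro x hx
              have hx2 : x.2 ∈ ft := mem_snd_enumerate ft x hx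
              rcases List.mem_append.mp (hperm.mem_iff.mp hx2) with hL | hR
              · left; rw [hprevn]; exact hdone _ hL
              · right
                have htle : t ≤ x.2 := by
                  rcases List.mem_cons.mp hR with rfl | hu
                  · exact le_refl _
                  · exact hrest_ge_t _ hu
                rw [hprevn, Int.toNat_of_nonneg (by omega : (0 : Int) ≤ t - prev)]
                omega
            have hcnt2 : E.countP (fun x => decide ((prev.toNat : Int) < x.2)) =
                (t :: rest).length := by
              rw [hcntP]; exact hcount prev (le_refl _) hlt_t
            have harg : prev.toNat + (t - prev).toNat = t.toNat := by omega
            rw [harg, hcnt2] at hjump2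
            have hprod : (((t - prev).toNat * (t :: rest).length : Nat) : Int) =
                (t - prev) * rem := by
              push_cast
              rw [Int.toNat_of_nonneg (by omega : (0 : Int) ≤ t - prev)]
            omega
        rw [hstep]
        exact ih (done ++ [t]) t k'
          (by rwa [List.append_assoc, List.singleton_append])
          (by intro u hu
              rcases List.mem_append.mp hu with h | h
              · exact le_trans (hdone u h) hts
              · simp at h; omega)
          hrest_ge_t hpair' ht0 hk'0 hlt' 

-- ===== VERDICT (by name: the statement is the Claim_ definition above) =====
theorem solution_spec : Claim_equal_solution := by
  intro ft k _ hpre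
  show solution ft k = solution_alt ft k
  by_cases hs : ft.sum ≤ k
  · simp [solution, solution_alt, hs]
  · have hpos : ∀ t ∈ ft, 1 ≤ t := by
      rcases hpre with h | ⟨h1, _⟩
      · exact absurd h hs
      · exact h1
    have hk1 : 1 ≤ k := by
      rcases hpre with h | ⟨_, h2⟩
      · exact absurd h hs
      · exact h2
    set s := PySem.List.sorted ft (fun t => t) false with hsrt
    have hsp : s.Perm ft := PySem.List.sorted_perm ft (fun t => t) false
    have hmain := loop_main ft hpos s [] 0 k
      (by simpa using hsp.symm)
      (by simp)
      (fun u hu => by have := hpos u (hsp.mem_iff.mp hu); omega)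
      (by simpa using PySem.List.sorted_pairwise ft (fun t => t))
      (le_refl 0)
      (by omega)
      (by
        have h0 : (s.map (fun t => t - 0)).sum = ft.sum := by
          simpa using hsp.sum_eq
        omega)
    simp only [Int.toNat_zero] at hmain
    rw [show eatenN 0 (PySem.List.enumerate ft) = 0 from rfl, Nat.zero_add] at hmain
    rw [show ((s.length : Nat) : Int) = PySem.List.len ft by
      rw [PySem.List.len_eq, PySem.List.length_sorted]] at hmain
    simp only [solution, solution_alt, if_neg hs]
    exact hmain
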